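-- pv_equiv track=rewrite | github.com/josteint/sidfinity | src/freq_reconstruct.py | _extract_frequencies
-- ===== SOURCE A (Python) =====
-- from collections import Counter
--
-- def _extract_frequencies(frames, min_hold=2):
--     """Extract freq values from 3 voices, filtering transients.
--
--     Only keeps frequencies held for >= min_hold consecutive frames.
--     Returns (set of stable freqs, Counter of all freqs).
--     """
--     all_freqs = Counter()
--     stable_freqs = set()
--
--     for v in range(1, 4):
--         prev_freq = 0
--         hold_count = 0
--         for frame in frames:
--             lo = frame.get(f'V{v}_FREQ_LO', 0)
--             hi = frame.get(f'V{v}_FREQ_HI', 0)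
--             freq = lo | (hi << 8)
--
--             # Skip very low frequencies (likely silence or noise)
--             if freq < 0x0080:
--                 prev_freq = 0
--                 hold_count = 0
--                 continue
--
--             all_freqs[freq] += 1
--
--             if freq == prev_freq:
--                 hold_count += 1
--                 if hold_count >= min_hold:
--                     stable_freqs.add(freq)
--             else:
--                 prev_freq = freq
--                 hold_count = 1
--
--     return stable_freqs, all_freqs
-- ===== SOURCE B (Python) =====
-- from collections import Counter
-- from itertools import groupby
--
--
-- def _extract_frequencies(frames, min_hold=2):
--     """Extract freq values from 3 voices, filtering transients.
--
--     Run-length formulation: group each voice's per-frame frequencies into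
--     maximal runs; a run of length >= max(min_hold, 2) makes its freq stable.
--     """
--     all_freqs = Counter()
--     stable_freqs = set()
--     thresh = max(min_hold, 2)
--
--     for v in range(1, 4):
--         freqs = [frame.get(f'V{v}_FREQ_LO', 0) | (frame.get(f'V{v}_FREQ_HI', 0) << 8)
--                  for frame in frames]
--         for freq, run in groupby(freqs):
--             if freq < 0x0080:
--                 continue
--             n = sum(1 for _ in run)
--             all_freqs[freq] += n
--             if n >= thresh:
--                 stable_freqs.add(freq)
--
--     return stable_freqs, all_freqs
-- ===== Notes on version B (the rewrite author's own statement) =====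
-- stated objective: idiomatic
-- what changed: Replaces the streaming prev_freq/hold_count state machine with a run-length-encoding pass (itertools.groupby) per voice: each maximal run of equal frequencies is counted once and declared stable iff its length reaches max(min_hold, 2).
import Mathlib
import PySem

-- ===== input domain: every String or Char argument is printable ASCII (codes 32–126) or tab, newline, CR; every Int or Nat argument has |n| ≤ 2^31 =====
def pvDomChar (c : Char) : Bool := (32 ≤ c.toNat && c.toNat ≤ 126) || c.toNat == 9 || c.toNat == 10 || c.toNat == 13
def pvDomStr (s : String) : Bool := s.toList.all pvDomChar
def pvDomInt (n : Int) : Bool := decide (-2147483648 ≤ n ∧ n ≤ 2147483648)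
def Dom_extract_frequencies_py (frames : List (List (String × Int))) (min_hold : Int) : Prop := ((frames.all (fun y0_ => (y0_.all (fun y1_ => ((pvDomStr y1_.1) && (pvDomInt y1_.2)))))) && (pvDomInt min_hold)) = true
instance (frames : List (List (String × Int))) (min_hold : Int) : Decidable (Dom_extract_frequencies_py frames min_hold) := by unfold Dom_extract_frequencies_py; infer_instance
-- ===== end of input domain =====

-- B replaces A's streaming prev_freq/hold_count state machine by a run-length-encoding
-- (groupby) pass per voice: a maximal run is stable iff its length reaches max(min_hold, 2).
-- Same cost; the objective is a more idiomatic decomposition.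

-- ===== PORT A =====
-- freq = frame.get(f'V{v}_FREQ_LO', 0) | (frame.get(f'V{v}_FREQ_HI', 0) << 8)  (shared by both ports: both Pythons compute this expression verbatim)
def pvFreq (v : Int) (frame : List (String × Int)) : Int :=
  let lo := (PySem.Dict.mk frame).getD ("V" ++ PySem.Int.toStr v ++ "_FREQ_LO") 0
  let hi := (PySem.Dict.mk frame).getD ("V" ++ PySem.Int.toStr v ++ "_FREQ_HI") 0
  PySem.Int.bor lo (hi <<< (8 : Nat))

-- body of A's inner `for frame in frames` loop; state = (stable_freqs, all_freqs, prev_freq, hold_count)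
def pvStepA (min_hold : Int) (st : PySem.Set Int × PySem.Dict Int Int × Int × Int) (freq : Int) :
    PySem.Set Int × PySem.Dict Int Int × Int × Int :=
  if freq < 128 then (st.1, st.2.1, 0, 0)
  else
    let C := (st.2.1).modify freq 0 (· + 1)   -- all_freqs[freq] += 1
    if freq == st.2.2.1 then
      let hold := st.2.2.2 + 1
      ((if min_hold ≤ hold then PySem.Set.add st.1 freq else st.1), C, st.2.2.1, hold)
    else (st.1, C, freq, 1)

def extract_frequencies_py (frames : List (List (String × Int))) (min_hold : Int) : List Int × (List (Int × Int)) :=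
  let res := (PySem.List.pyRange 1 4 1).foldl
    (fun SC v =>
      let st := frames.foldl (fun st frame => pvStepA min_hold st (pvFreq v frame)) (SC.1, SC.2, 0, 0)
      (st.1, st.2.1))
    ((PySem.Set.empty : PySem.Set Int), (PySem.Dict.empty : PySem.Dict Int Int))
  (res.1, res.2.items)

-- ===== PORT B =====
-- itertools.groupby as run-length encoding: (value, run length) of each maximal run
def pvRuns (l : List Int) : List (Int × Nat) :=
  match l with
  | [] => []
  | x :: xs => (x, 1 + (xs.takeWhile (· == x)).length) :: pvRuns (xs.dropWhile (· == x))
termination_by l.length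
decreasing_by
  have := List.length_dropWhile_le (fun y => y == x) xs
  simp only [List.length_cons]
  omega

-- body of B's `for freq, run in groupby(freqs)` loop; state = (stable_freqs, all_freqs)
def pvStepB (thresh : Int) (SC : PySem.Set Int × PySem.Dict Int Int) (g : Int × Nat) :
    PySem.Set Int × PySem.Dict Int Int :=
  if g.1 < 128 then SC
  else
    ((if thresh ≤ (g.2 : Int) then PySem.Set.add SC.1 g.1 else SC.1),
     SC.2.modify g.1 0 (· + (g.2 : Int)))   -- all_freqs[freq] += n

def extract_frequencies_py_alt (frames : List (List (String × Int))) (min_hold : Int) : List Int × (List (Int × Int)) :=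
  let thresh := max min_hold 2
  let res := (PySem.List.pyRange 1 4 1).foldl
    (fun SC v => (pvRuns (frames.map (fun frame => pvFreq v frame))).foldl (pvStepB thresh) SC)
    ((PySem.Set.empty : PySem.Set Int), (PySem.Dict.empty : PySem.Dict Int Int))
  (res.1, res.2.items)

-- ===== PRECONDITION & SPEC =====
def Spec_extract_frequencies_py (frames : List (List (String × Int))) (min_hold : Int) (out : List Int × (List (Int × Int))) : Prop := out = extract_frequencies_py_alt frames min_hold
instance (frames : List (List (String × Int))) (min_hold : Int) (out : List Int × (List (Int × Int))) : Decidable (Spec_extract_frequencies_py frames min_hold out) := by unfold Spec_extract_frequencies_py; infer_instance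

-- ===== CLAIM (what is proved, stated in full; the proofs are below) =====
def Claim_equal_extract_frequencies_py : Prop := ∀ (frames : List (List (String × Int))) (min_hold : Int), Dom_extract_frequencies_py frames min_hold → Spec_extract_frequencies_py frames min_hold (extract_frequencies_py frames min_hold)

-- ===== LEMMAS AND PROOFS =====

-- adding an element twice to a set is adding it once
theorem pv_set_add_add (S : PySem.Set Int) (x : Int) :
    PySem.Set.add (PySem.Set.add S x) x = PySem.Set.add S x := by
  by_cases h : S.contains x = true <;>
    simp_all [PySem.Set.add, PySem.Set.contains]

-- two counter bumps at the same key fuse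
theorem pv_modify_modify (C : PySem.Dict Int Int) (k a b : Int) :
    (C.modify k 0 (· + a)).modify k 0 (· + b) = C.modify k 0 (· + (a + b)) := by
  simp [PySem.Dict.modify, PySem.Dict.getD_insert_self, PySem.Dict.insert_insert_self, add_assoc]

-- a run of low frequencies only resets prev/hold
theorem pv_lowBlock (min_hold x : Int) (hx : x < 128) (k : Nat) :
    ∀ (S : PySem.Set Int) (C : PySem.Dict Int Int) (p h : Int),
      (List.replicate (k + 1) x).foldl (pvStepA min_hold) (S, C, p, h) = (S, C, 0, 0) := by
  induction k with
  | zero => intro S C p h; simp [pvStepA, hx]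
  | succ k ih =>
      intro S C p h
      rw [List.replicate_succ', List.foldl_append, ih]
      simp [pvStepA, hx]

-- a run of k+1 high frequencies entered with prev ≠ x
theorem pv_highBlock (min_hold x : Int) (hx : ¬ x < 128) (k : Nat) :
    ∀ (S : PySem.Set Int) (C : PySem.Dict Int Int) (p h : Int), p ≠ x →
      (List.replicate (k + 1) x).foldl (pvStepA min_hold) (S, C, p, h) =
        ((if 2 ≤ (k : Int) + 1 ∧ min_hold ≤ (k : Int) + 1 then PySem.Set.add S x else S),
         C.modify x 0 (· + ((k : Int) + 1)), x, (k : Int) + 1) := by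
  induction k with
  | zero =>
      intro S C p h hp
      have hbe : (x == p) = false := by simpa using (Ne.symm hp)
      simp [pvStepA, hx, hbe]
  | succ k ih =>
      intro S C p h hp
      rw [List.replicate_succ', List.foldl_append, ih S C p h hp]
      simp only [List.foldl_cons, List.foldl_nil, pvStepA, hx, if_false, beq_self_eq_true, if_true]
      have hd : ((C.modify x 0 (· + ((k : Int) + 1))).modify x 0 (· + 1))
          = C.modify x 0 (· + (((k + 1 : Nat) : Int) + 1)) := by
        rw [pv_modify_modify]
        exact congrArg (C.modify x 0) (funext fun v => by push_cast; ring)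
      rw [hd]
      have hh : ((k : Int) + 1) + 1 = ((k + 1 : Nat) : Int) + 1 := by push_cast; ring
      rw [hh]
      split_ifs with h1 h2 h3
      all_goals try rw [pv_set_add_add]
      all_goals try rfl
      all_goals (exfalso; push_cast at *; omega)

-- first element surviving dropWhile fails the predicate
theorem pv_head?_dropWhile {α : Type} (p : α → Bool) :
    ∀ (l : List α) (y : α), (l.dropWhile p).head? = some y → p y = false := by
  intro l
  induction l with
  | nil => simp
  | cons a t ih =>
      intro y hy
      by_cases ha : p a = true
      · rw [List.dropWhile_cons_of_pos ha] at hy; exact ih y hy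
      · rw [List.dropWhile_cons_of_neg ha] at hy
        simp at hy
        subst hy
        simpa using ha

-- a taken-while block is a replicate
theorem pv_takeWhile_replicate (x : Int) (xs : List Int) :
    xs.takeWhile (· == x) = List.replicate (xs.takeWhile (· == x)).length x := by
  rw [List.eq_replicate_length]
  intro b hb
  have := List.mem_takeWhile_imp hb
  simpa using this

-- core: per-voice, A's streaming fold equals B's fold over the run-length encoding
theorem pv_voice (min_hold : Int) :
    ∀ (n : Nat) (l : List Int), l.length ≤ n →
      ∀ (S : PySem.Set Int) (C : PySem.Dict Int Int) (p h : Int),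
        (∀ x, l.head? = some x → ¬ x < 128 → p ≠ x) →
        ((l.foldl (pvStepA min_hold) (S, C, p, h)).1,
         (l.foldl (pvStepA min_hold) (S, C, p, h)).2.1) =
          (pvRuns l).foldl (pvStepB (max min_hold 2)) (S, C) := by
  intro n
  induction n with
  | zero =>
      intro l hl S C p h _
      have : l = [] := List.length_eq_zero_iff.mp (Nat.le_zero.mp hl)
      subst this
      simp [pvRuns]
  | succ n ih =>
      intro l hl S C p h hp
      match l with
      | [] => simp [pvRuns]
      | x :: xs =>
        have hruns : pvRuns (x :: xs)
            = (x, 1 + (xs.takeWhile (· == x)).length) :: pvRuns (xs.dropWhile (· == x)) := by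
          rw [pvRuns]
        have hsplit : x :: xs
            = List.replicate ((xs.takeWhile (· == x)).length + 1) x ++ xs.dropWhile (· == x) := by
          rw [List.replicate_succ, List.cons_append]
          congr 1
          conv_lhs => rw [← List.takeWhile_append_dropWhile (p := (· == x)) (l := xs)]
          rw [← pv_takeWhile_replicate x xs]
        have hlen : (xs.dropWhile (· == x)).length ≤ n := by
          have h1 := List.length_dropWhile_le (fun y => y == x) xs
          simp only [List.length_cons] at hl
          omega
        rw [hruns]
        conv_lhs => rw [hsplit]
        rw [List.foldl_append, List.foldl_cons]
        by_cases hx : x < 128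
        · rw [pv_lowBlock min_hold x hx]
          have hstep : pvStepB (max min_hold 2) (S, C) (x, 1 + (xs.takeWhile (· == x)).length)
              = (S, C) := by
            simp [pvStepB, hx]
          rw [hstep]
          exact ih _ hlen S C 0 0 (fun y _ hy => by omega)
        · have hpx : p ≠ x := hp x rfl hx
          rw [pv_highBlock min_hold x hx _ S C p h hpx]
          have hstep : pvStepB (max min_hold 2) (S, C) (x, 1 + (xs.takeWhile (· == x)).length)
              = ((if 2 ≤ ((xs.takeWhile (· == x)).length : Int) + 1
                    ∧ min_hold ≤ ((xs.takeWhile (· == x)).length : Int) + 1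
                  then PySem.Set.add S x else S),
                 C.modify x 0 (· + (((xs.takeWhile (· == x)).length : Int) + 1))) := by
            simp only [pvStepB, hx, if_false]
            refine Prod.ext ?_ ?_ <;> dsimp only
            · refine if_congr ?_ rfl rfl
              rw [max_le_iff]
              push_cast
              omega
            · exact congrArg (C.modify x 0) (funext fun v => by push_cast; ring)
          rw [hstep]
          refine ih _ hlen _ _ x _ (fun y hy _ => ?_)
          have := pv_head?_dropWhile (· == x) xs y hy
          simp at this
          omega

-- ===== VERDICT (by name: the statement is the Claim_ definition above) =====
theorem extract_frequencies_py_spec : Claim_equal_extract_frequencies_py := by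
  intro frames min_hold _
  unfold Spec_extract_frequencies_py extract_frequencies_py extract_frequencies_py_alt
  have hfun : (fun (SC : PySem.Set Int × PySem.Dict Int Int) (v : Int) =>
        (let st := frames.foldl (fun st frame => pvStepA min_hold st (pvFreq v frame)) (SC.1, SC.2, 0, 0)
         (st.1, st.2.1)))
      = (fun SC v => (pvRuns (frames.map (fun frame => pvFreq v frame))).foldl (pvStepB (max min_hold 2)) SC) := by
    funext SC v
    have hm : frames.foldl (fun st frame => pvStepA min_hold st (pvFreq v frame)) (SC.1, SC.2, 0, 0)
        = (frames.map (fun frame => pvFreq v frame)).foldl (pvStepA min_hold) (SC.1, SC.2, 0, 0) := by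
      rw [List.foldl_map]
    simp only [hm]
    have := pv_voice min_hold (frames.map (fun frame => pvFreq v frame)).length
      (frames.map (fun frame => pvFreq v frame)) le_rfl SC.1 SC.2 0 0
      (fun y _ hy => by omega)
    simpa using this
  rw [hfun]
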